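-- pv_equiv track=rewrite | github.com/jeremydhoover-blip/hoover-content-system | skills/technical-documentation/writing-how-to-guides/scripts/heading_validator.py | validate_required_sections
-- ===== SOURCE A (Python) =====
-- REQUIRED_SECTIONS = ["Prerequisites", "Steps", "Verify"]
--
-- def validate_required_sections(headings: list[tuple[int, str, int]]) -> list[str]:
--     """Check that required H2 sections exist."""
--     errors = []
--     h2_texts = {text for level, text, _ in headings if level == 2}
--
--     for section in REQUIRED_SECTIONS:
--         # Check for section name at start (e.g., "Verify your setup" matches "Verify")
--         found = any(h2.startswith(section) for h2 in h2_texts)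
--         if not found:
--             errors.append(f"Missing required section: '{section}'")
--
--     return errors
-- ===== SOURCE B (Python) =====
-- REQUIRED_SECTIONS = ["Prerequisites", "Steps", "Verify"]
--
-- def validate_required_sections(headings: list[tuple[int, str, int]]) -> list[str]:
--     """Check that required H2 sections exist, via a hash index of fixed-length prefixes."""
--     # the distinct lengths of the required section names: len("Steps"), len("Verify"), len("Prerequisites")
--     cuts = set()
--     for level, text, _ in headings:
--         if level == 2:
--             for n in (5, 6, 13):
--                 cuts.add(text[:n])
--     return [f"Missing required section: '{s}'" for s in REQUIRED_SECTIONS if s not in cuts]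
-- ===== Notes on version B (the rewrite author's own statement) =====
-- stated objective: alternative
-- what changed: B never calls startswith: one pass over the headings builds a hash set of the sliced prefixes text[:5], text[:6], text[:13] (the distinct required-name lengths), and each required section is then decided by a single exact set-membership test instead of scanning all H2 texts with a prefix check per section.
import Mathlib
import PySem

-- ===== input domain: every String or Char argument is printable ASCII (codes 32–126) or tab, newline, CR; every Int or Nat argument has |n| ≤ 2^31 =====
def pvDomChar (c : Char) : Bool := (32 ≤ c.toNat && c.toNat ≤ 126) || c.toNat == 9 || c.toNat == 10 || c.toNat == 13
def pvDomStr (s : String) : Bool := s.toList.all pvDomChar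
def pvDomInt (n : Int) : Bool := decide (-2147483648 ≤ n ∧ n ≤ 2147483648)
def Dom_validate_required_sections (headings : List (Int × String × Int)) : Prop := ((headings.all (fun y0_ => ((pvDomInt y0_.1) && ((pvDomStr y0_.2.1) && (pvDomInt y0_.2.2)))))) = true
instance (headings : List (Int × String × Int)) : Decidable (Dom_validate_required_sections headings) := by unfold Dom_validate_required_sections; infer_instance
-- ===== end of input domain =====

-- B replaces A's per-section startswith scan of the H2-text set by a single pass that
-- hash-indexes the sliced prefixes text[:5]/text[:6]/text[:13]; sections are then exact lookups.

-- module constant shared by both versions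
def REQUIRED_SECTIONS : List String := ["Prerequisites", "Steps", "Verify"]

-- ===== PORT A =====
def validate_required_sections (headings : List (Int × String × Int)) : List String :=
  let h2_texts : PySem.Set String :=
    PySem.Set.ofList ((headings.filter (fun h => h.1 == 2)).map (fun h => h.2.1))
  REQUIRED_SECTIONS.foldl (fun errors sec =>
    if h2_texts.any (fun h2 => PySem.Str.startswith h2 sec) then errors
    else errors ++ ["Missing required section: '" ++ sec ++ "'"]) []

-- ===== PORT B =====
-- the distinct lengths of the required section names (Source B's tuple (5, 6, 13))
def pvCutLens : List Int := [5, 6, 13]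

def validate_required_sections_alt (headings : List (Int × String × Int)) : List String :=
  let cuts : PySem.Set String :=
    headings.foldl (fun c h =>
      if h.1 == 2 then
        pvCutLens.foldl (fun c2 n =>
          PySem.Set.add c2 (PySem.Str.slice h.2.1 none (some n))) c
      else c) PySem.Set.empty
  (REQUIRED_SECTIONS.filter (fun sec => !(PySem.Set.contains cuts sec))).map
    (fun sec => "Missing required section: '" ++ sec ++ "'")

-- ===== PRECONDITION & SPEC =====
def Spec_validate_required_sections (headings : List (Int × String × Int)) (out : List String) : Prop := out = validate_required_sections_alt headings
instance (headings : List (Int × String × Int)) (out : List String) : Decidable (Spec_validate_required_sections headings out) := by unfold Spec_validate_required_sections; infer_instance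

-- ===== CLAIM =====
def Claim_equal_validate_required_sections : Prop := ∀ (headings : List (Int × String × Int)), Dom_validate_required_sections headings → Spec_validate_required_sections headings (validate_required_sections headings)

-- ===== LEMMAS AND PROOFS =====

-- a slice t[:n] that equals sec witnesses sec being a prefix of t
theorem slice_any_imp (t sec : String) (n : Int) (hn : 0 ≤ n)
    (h : PySem.Str.slice t none (some n) = sec) : sec.toList <+: t.toList := by
  rw [← String.toList_inj, PySem.Str.toList_slice, PySem.Chars.slice_eq_listSlice,
    PySem.List.slice_to _ hn] at h
  rw [← h]
  exact List.take_prefix _ _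

-- conversely, slicing at exactly sec's length recovers sec whenever sec is a prefix
theorem slice_of_prefix (t sec : String) (n : Int) (hn : (sec.toList.length : Int) = n)
    (h : sec.toList <+: t.toList) : PySem.Str.slice t none (some n) = sec := by
  rw [← String.toList_inj, PySem.Str.toList_slice, PySem.Chars.slice_eq_listSlice,
    PySem.List.slice_to _ (by omega), ← hn]
  simp only [Int.toNat_natCast]
  exact (List.prefix_iff_eq_take.mp h).symm

-- the inner fold of B: membership of the cut set extended by t's slices
theorem mem_innerFold (t : String) (ns : List Int) (c : PySem.Set String) (y : String) :
    y ∈ ns.foldl (fun c2 n =>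
        PySem.Set.add c2 (PySem.Str.slice t none (some n))) c ↔
      y ∈ c ∨ ∃ n ∈ ns, PySem.Str.slice t none (some n) = y := by
  induction ns generalizing c with
  | nil => simp
  | cons m rest ih =>
    simp only [List.foldl_cons]
    rw [ih]
    simp only [PySem.Set.mem_add, List.mem_cons]
    constructor
    · rintro (⟨h | rfl⟩ | ⟨n, hn, hs⟩)
      · exact Or.inl h
      · exact Or.inr ⟨m, Or.inl rfl, rfl⟩
      · exact Or.inr ⟨n, Or.inr hn, hs⟩
    · rintro (h | ⟨n, (rfl | hn), hs⟩)
      · exact Or.inl (Or.inl h)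
      · exact Or.inl (Or.inr hs.symm)
      · exact Or.inr ⟨n, hn, hs⟩

-- the outer fold of B: the cut set after the pass over headings
theorem mem_outerFold (headings : List (Int × String × Int)) (c : PySem.Set String) (y : String) :
    y ∈ headings.foldl (fun c h =>
        if h.1 == 2 then
          pvCutLens.foldl (fun c2 n =>
            PySem.Set.add c2 (PySem.Str.slice h.2.1 none (some n))) c
        else c) c ↔
      y ∈ c ∨ ∃ h ∈ headings, h.1 = 2 ∧
        ∃ n ∈ pvCutLens, PySem.Str.slice h.2.1 none (some n) = y := by
  induction headings generalizing c with
  | nil => simp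
  | cons h rest ih =>
    simp only [List.foldl_cons]
    by_cases h2 : h.1 = 2
    · rw [if_pos (by simpa using h2), ih, mem_innerFold]
      constructor
      · rintro ((hf | hs) | ⟨g, hg, hgs⟩)
        · exact Or.inl hf
        · exact Or.inr ⟨h, List.mem_cons_self, h2, hs⟩
        · exact Or.inr ⟨g, List.mem_cons_of_mem _ hg, hgs⟩
      · rintro (hf | ⟨g, hg, hg2, hgs⟩)
        · exact Or.inl (Or.inl hf)
        · rcases List.mem_cons.mp hg with rfl | hg'
          · exact Or.inl (Or.inr hgs)
          · exact Or.inr ⟨g, hg', hg2, hgs⟩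
    · rw [if_neg (by simpa using h2), ih]
      constructor
      · rintro (hf | ⟨g, hg, hgs⟩)
        · exact Or.inl hf
        · exact Or.inr ⟨g, List.mem_cons_of_mem _ hg, hgs⟩
      · rintro (hf | ⟨g, hg, hg2, hgs⟩)
        · exact Or.inl hf
        · rcases List.mem_cons.mp hg with rfl | hg'
          · exact absurd hg2 h2
          · exact Or.inr ⟨g, hg', hg2, hgs⟩

-- the two membership tests agree on a required section whose length is one of the cut lengths
theorem test_eq (headings : List (Int × String × Int)) (sec : String)
    (hlen : (sec.toList.length : Int) ∈ pvCutLens) :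
    (PySem.Set.ofList ((headings.filter (fun h => h.1 == 2)).map (fun h => h.2.1))).any
        (fun h2 => PySem.Str.startswith h2 sec) =
      PySem.Set.contains
        (headings.foldl (fun c h =>
          if h.1 == 2 then
            pvCutLens.foldl (fun c2 n =>
              PySem.Set.add c2 (PySem.Str.slice h.2.1 none (some n))) c
          else c) PySem.Set.empty) sec := by
  rw [Bool.eq_iff_iff, List.any_eq_true]
  rw [show (PySem.Set.contains _ sec = true) ↔ _ from PySem.Set.contains_iff _ _]
  rw [mem_outerFold headings PySem.Set.empty sec]
  constructor
  · rintro ⟨t, ht, hts⟩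
    rw [PySem.Set.mem_ofList] at ht
    rcases List.mem_map.mp ht with ⟨h, hh, rfl⟩
    rcases List.mem_filter.mp hh with ⟨hh', h2⟩
    refine Or.inr ⟨h, hh', by simpa using h2, (sec.toList.length : Int), hlen, ?_⟩
    refine slice_of_prefix h.2.1 sec _ rfl ?_
    simpa [PySem.Chars.startswith_iff] using hts
  · rintro (hf | ⟨h, hh, h2, n, hn, hs⟩)
    · simp [PySem.Set.empty] at hf
    · refine ⟨h.2.1, ?_, ?_⟩
      · rw [PySem.Set.mem_ofList]
        exact List.mem_map.mpr ⟨h, List.mem_filter.mpr ⟨hh, by simpa using h2⟩, rfl⟩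
      · have hn0 : 0 ≤ n := by
          simp only [pvCutLens, List.mem_cons, List.not_mem_nil, or_false] at hn
          rcases hn with rfl | rfl | rfl <;> norm_num
        simpa [PySem.Chars.startswith_iff] using slice_any_imp h.2.1 sec n hn0 hs

-- ===== VERDICT =====
theorem validate_required_sections_spec : Claim_equal_validate_required_sections := by
  intro headings _
  unfold Spec_validate_required_sections validate_required_sections validate_required_sections_alt
  have h1 := test_eq headings "Prerequisites" (by decide)
  have h2 := test_eq headings "Steps" (by decide)
  have h3 := test_eq headings "Verify" (by decide)
  simp only [REQUIRED_SECTIONS, List.foldl, List.filter] at *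
  rw [h1, h2, h3]
  cases hb1 : PySem.Set.contains _ "Prerequisites" <;>
    cases hb2 : PySem.Set.contains _ "Steps" <;>
      cases hb3 : PySem.Set.contains _ "Verify" <;> simp
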